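-- pv_equiv track=rewrite | github.com/lherron2/seed-from-alignment | src/lib/sample_cacofold_structures.py | pairs_from_track
-- ===== SOURCE A (Python) =====
-- OPEN_TO_CLOSE = {"(": ")", "[": "]", "{": "}", "<": ">"}
--
-- CLOSE_TO_OPEN = {v: k for k, v in OPEN_TO_CLOSE.items()}
--
-- def pairs_from_track(track: str) -> list[tuple[int, int]]:
--     """
--     Given a WUSS-like track string (for all alignment columns),
--     return a list of (i, j) pairs in alignment coordinates (0-based).
--
--     Uses bracket types: <>, (), [], {}, and a-z.
--     """
--     stacks = {op: [] for op in OPEN_TO_CLOSE}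
--     result: list[tuple[int, int]] = []
--
--     for i, ch in enumerate(track):
--         if ch in OPEN_TO_CLOSE:
--             stacks[ch].append(i)
--         elif ch in CLOSE_TO_OPEN:
--             op = CLOSE_TO_OPEN[ch]
--             if stacks[op]:
--                 j = stacks[op].pop()
--                 result.append((j, i))
--
--     result.sort()
--     return result
-- ===== SOURCE B (Python) =====
-- def pairs_from_track(track: str) -> list[tuple[int, int]]:
--     """
--     Given a WUSS-like track string (for all alignment columns),
--     return a list of (i, j) pairs in alignment coordinates (0-based).
--
--     Uses bracket types: <>, (), [], {}.
--     """
--     result: list[tuple[int, int]] = []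
--     for op, cl in (("(", ")"), ("[", "]"), ("{", "}"), ("<", ">")):
--         stack: list[int] = []
--         for i, ch in enumerate(track):
--             if ch == op:
--                 stack.append(i)
--             elif ch == cl and stack:
--                 result.append((stack.pop(), i))
--     result.sort()
--     return result
-- ===== Notes on version B (the rewrite author's own statement) =====
-- stated objective: alternative
-- what changed: Instead of one pass holding a dict of four stacks keyed by the opening bracket, B makes one independent scan per bracket type with a single plain stack, concatenates the emitted pairs across types and sorts once; the grouping of work (per-type scans vs one interleaved pass) and the state maintained are different.
import Mathlib
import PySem

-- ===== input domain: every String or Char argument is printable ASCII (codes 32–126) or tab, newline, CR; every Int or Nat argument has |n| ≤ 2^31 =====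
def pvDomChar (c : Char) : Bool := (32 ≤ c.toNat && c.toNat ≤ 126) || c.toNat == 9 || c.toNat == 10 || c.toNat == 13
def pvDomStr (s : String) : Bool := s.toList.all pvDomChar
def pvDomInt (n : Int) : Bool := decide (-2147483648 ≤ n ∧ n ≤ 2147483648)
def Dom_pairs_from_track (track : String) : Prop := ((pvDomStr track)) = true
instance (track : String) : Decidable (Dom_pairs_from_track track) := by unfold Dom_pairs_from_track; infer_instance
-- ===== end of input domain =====

-- B replaces A's single pass over the track holding a dict of four stacks by four independent
-- single-stack scans, one per bracket type, concatenated and sorted once (objective: alternative).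

-- ===== PORT A =====
def pvOPEN_TO_CLOSE : PySem.Dict Char Char :=
  PySem.Dict.ofList [('(', ')'), ('[', ']'), ('{', '}'), ('<', '>')]

def pvCLOSE_TO_OPEN : PySem.Dict Char Char :=
  PySem.Dict.ofList (pvOPEN_TO_CLOSE.items.map (fun kv => (kv.2, kv.1)))

-- one iteration of A's loop body; every key of stacks is an opening bracket and op is always a
-- key of stacks, so Python's stacks[ch] / stacks[op] is getD _ [] (never the default)
def pvAstep (st : PySem.Dict Char (List Int) × List (Int × Int)) (p : Int × Char) :
    PySem.Dict Char (List Int) × List (Int × Int) :=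
  match st, p with
  | (stks, result), (i, ch) =>
    if pvOPEN_TO_CLOSE.contains ch then
      (stks.insert ch (stks.getD ch [] ++ [i]), result)
    else if pvCLOSE_TO_OPEN.contains ch then
      let op := pvCLOSE_TO_OPEN.getD ch ch
      -- 'if stacks[op]: j = stacks[op].pop(); result.append((j, i))' — pop? is none exactly on []
      match PySem.List.pop? (stks.getD op []) (-1) with
      | some (j, rest) => (stks.insert op rest, result ++ [(j, i)])
      | none => (stks, result)
    else (stks, result)

def pairs_from_track (track : String) : List (Int × Int) :=
  let stks := PySem.Dict.ofList (pvOPEN_TO_CLOSE.keys.map (fun k => (k, ([] : List Int))))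
  let result := ((PySem.List.enumerate track.toList 0).foldl pvAstep (stks, [])).2
  PySem.List.sorted2 result (fun p => p.1) (fun p => p.2) false

-- ===== PORT B =====
-- one iteration of B's inner loop for bracket type (op, cl)
def pvBstep (op cl : Char) (st : List Int × List (Int × Int)) (p : Int × Char) :
    List Int × List (Int × Int) :=
  match st, p with
  | (stack, result), (i, ch) =>
    if ch = op then (stack ++ [i], result)
    else if ch = cl then
      -- 'elif ch == cl and stack: result.append((stack.pop(), i))'
      match PySem.List.pop? stack (-1) with
      | some (j, rest) => (rest, result ++ [(j, i)])
      | none => (stack, result)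
    else (stack, result)

def pairs_from_track_alt (track : String) : List (Int × Int) :=
  let result :=
    [('(', ')'), ('[', ']'), ('{', '}'), ('<', '>')].foldl
      (fun res oc =>
        ((PySem.List.enumerate track.toList 0).foldl (pvBstep oc.1 oc.2) ([], res)).2) []
  PySem.List.sorted2 result (fun p => p.1) (fun p => p.2) false

-- ===== PRECONDITION & SPEC =====
def Spec_pairs_from_track (track : String) (out : List (Int × Int)) : Prop := out = pairs_from_track_alt track
instance (track : String) (out : List (Int × Int)) : Decidable (Spec_pairs_from_track track out) := by unfold Spec_pairs_from_track; infer_instance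

-- ===== CLAIM (what is proved, stated in full; the proofs are below) =====
def Claim_equal_pairs_from_track : Prop := ∀ (track : String), Dom_pairs_from_track track → Spec_pairs_from_track track (pairs_from_track track)

-- ===== LEMMAS AND PROOFS =====

-- the pairs B's scan for type (op, cl) emits from stack s over the enumerated suffix l
def pvEmit (op cl : Char) (s : List Int) : List (Int × Char) → List (Int × Int)
  | [] => []
  | (i, ch) :: rest =>
    if ch = op then pvEmit op cl (s ++ [i]) rest
    else if ch = cl then
      match PySem.List.pop? s (-1) with
      | some (j, r) => (j, i) :: pvEmit op cl r rest
      | none => pvEmit op cl s rest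
    else pvEmit op cl s rest

lemma pvB_acc (op cl : Char) (l : List (Int × Char)) :
    ∀ (s : List Int) (acc : List (Int × Int)),
      (l.foldl (pvBstep op cl) (s, acc)).2 = acc ++ pvEmit op cl s l := by
  induction l with
  | nil => intro s acc; simp [pvEmit]
  | cons p rest ih =>
    rintro s acc
    obtain ⟨i, ch⟩ := p
    by_cases h1 : ch = op
    · simp [pvBstep, pvEmit, h1, ih]
    · by_cases h2 : ch = cl
      · subst h2
        cases hp : PySem.List.pop? s (-1) with
        | none => simp [pvBstep, pvEmit, h1, hp, ih]
        | some jr =>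
          obtain ⟨j, r⟩ := jr
          simp [pvBstep, pvEmit, h1, hp, ih]
      · simp [pvBstep, pvEmit, h1, h2, ih]

lemma pvContainsO (ch : Char) (h1 : ch ≠ '(') (h2 : ch ≠ '[') (h3 : ch ≠ '{') (h4 : ch ≠ '<') :
    pvOPEN_TO_CLOSE.contains ch = false := by
  rw [show pvOPEN_TO_CLOSE = PySem.Dict.mk [('(', ')'), ('[', ']'), ('{', '}'), ('<', '>')] from rfl,
    PySem.Dict.contains_mk]
  simp [Ne.symm h1, Ne.symm h2, Ne.symm h3, Ne.symm h4]

lemma pvContainsC (ch : Char) (h5 : ch ≠ ')') (h6 : ch ≠ ']') (h7 : ch ≠ '}') (h8 : ch ≠ '>') :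
    pvCLOSE_TO_OPEN.contains ch = false := by
  rw [show pvCLOSE_TO_OPEN = PySem.Dict.mk [(')', '('), (']', '['), ('}', '{'), ('>', '<')] from rfl,
    PySem.Dict.contains_mk]
  simp [Ne.symm h5, Ne.symm h6, Ne.symm h7, Ne.symm h8]

lemma pvMid1 {a : Int × Int} {L1 X : List (Int × Int)} :
    (a :: (L1 ++ X)).Perm (L1 ++ (a :: X)) := List.perm_middle.symm

lemma pvMid2 {a : Int × Int} {L1 L2 X : List (Int × Int)} :
    (a :: (L1 ++ (L2 ++ X))).Perm (L1 ++ (L2 ++ (a :: X))) :=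
  pvMid1.trans (List.Perm.append_left L1 pvMid1)

lemma pvMid3 {a : Int × Int} {L1 L2 L3 X : List (Int × Int)} :
    (a :: (L1 ++ (L2 ++ (L3 ++ X)))).Perm (L1 ++ (L2 ++ (L3 ++ (a :: X)))) :=
  pvMid1.trans (List.Perm.append_left L1 pvMid2)

-- A's interleaved pass, from any four stack contents, emits (as a multiset) exactly what the four
-- per-type scans emit
lemma pvA_inv (l : List (Int × Char)) :
    ∀ (s1 s2 s3 s4 : List Int) (res : List (Int × Int)),
      ((l.foldl pvAstep (PySem.Dict.mk [('(', s1), ('[', s2), ('{', s3), ('<', s4)], res)).2).Perm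
        (res ++ pvEmit '(' ')' s1 l ++ pvEmit '[' ']' s2 l ++ pvEmit '{' '}' s3 l ++ pvEmit '<' '>' s4 l) := by
  induction l with
  | nil => intro s1 s2 s3 s4 res; simp [pvEmit]
  | cons p rest ih =>
    intro s1 s2 s3 s4 res
    obtain ⟨i, ch⟩ := p
    rw [List.foldl_cons]
    by_cases h1 : ch = '('
    · subst h1
      have hstep : pvAstep (PySem.Dict.mk [('(', s1), ('[', s2), ('{', s3), ('<', s4)], res) (i, '(')
          = (PySem.Dict.mk [('(', s1 ++ [i]), ('[', s2), ('{', s3), ('<', s4)], res) := rfl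
      rw [hstep]
      refine (ih _ _ _ _ _).trans ?_
      simp [pvEmit]
    · by_cases h2 : ch = '['
      · subst h2
        have hstep : pvAstep (PySem.Dict.mk [('(', s1), ('[', s2), ('{', s3), ('<', s4)], res) (i, '[')
            = (PySem.Dict.mk [('(', s1), ('[', s2 ++ [i]), ('{', s3), ('<', s4)], res) := rfl
        rw [hstep]
        refine (ih _ _ _ _ _).trans ?_
        simp [pvEmit]
      · by_cases h3 : ch = '{'
        · subst h3
          have hstep : pvAstep (PySem.Dict.mk [('(', s1), ('[', s2), ('{', s3), ('<', s4)], res) (i, '{')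
              = (PySem.Dict.mk [('(', s1), ('[', s2), ('{', s3 ++ [i]), ('<', s4)], res) := rfl
          rw [hstep]
          refine (ih _ _ _ _ _).trans ?_
          simp [pvEmit]
        · by_cases h4 : ch = '<'
          · subst h4
            have hstep : pvAstep (PySem.Dict.mk [('(', s1), ('[', s2), ('{', s3), ('<', s4)], res) (i, '<')
                = (PySem.Dict.mk [('(', s1), ('[', s2), ('{', s3), ('<', s4 ++ [i])], res) := rfl
            rw [hstep]
            refine (ih _ _ _ _ _).trans ?_
            simp [pvEmit]
          · by_cases h5 : ch = ')'
            · subst h5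
              cases hp : PySem.List.pop? s1 (-1) with
              | none =>
                have hstep : pvAstep (PySem.Dict.mk [('(', s1), ('[', s2), ('{', s3), ('<', s4)], res) (i, ')')
                    = (PySem.Dict.mk [('(', s1), ('[', s2), ('{', s3), ('<', s4)], res) := by
                  have h0 : pvAstep (PySem.Dict.mk [('(', s1), ('[', s2), ('{', s3), ('<', s4)], res) (i, ')')
                      = (match PySem.List.pop? s1 (-1) with
                         | some (j, r) => (PySem.Dict.mk [('(', r), ('[', s2), ('{', s3), ('<', s4)], res ++ [(j, i)])
                         | none => (PySem.Dict.mk [('(', s1), ('[', s2), ('{', s3), ('<', s4)], res)) := rfl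
                  rw [h0, hp]
                rw [hstep]
                refine (ih _ _ _ _ _).trans ?_
                simp [pvEmit, hp]
              | some jr =>
                obtain ⟨j, r⟩ := jr
                have hstep : pvAstep (PySem.Dict.mk [('(', s1), ('[', s2), ('{', s3), ('<', s4)], res) (i, ')')
                    = (PySem.Dict.mk [('(', r), ('[', s2), ('{', s3), ('<', s4)], res ++ [(j, i)]) := by
                  have h0 : pvAstep (PySem.Dict.mk [('(', s1), ('[', s2), ('{', s3), ('<', s4)], res) (i, ')')
                      = (match PySem.List.pop? s1 (-1) with
                         | some (j, r) => (PySem.Dict.mk [('(', r), ('[', s2), ('{', s3), ('<', s4)], res ++ [(j, i)])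
                         | none => (PySem.Dict.mk [('(', s1), ('[', s2), ('{', s3), ('<', s4)], res)) := rfl
                  rw [h0, hp]
                rw [hstep]
                refine (ih _ _ _ _ _).trans ?_
                simp [pvEmit, hp, List.append_assoc]
            · by_cases h6 : ch = ']'
              · subst h6
                cases hp : PySem.List.pop? s2 (-1) with
                | none =>
                  have hstep : pvAstep (PySem.Dict.mk [('(', s1), ('[', s2), ('{', s3), ('<', s4)], res) (i, ']')
                      = (PySem.Dict.mk [('(', s1), ('[', s2), ('{', s3), ('<', s4)], res) := by
                    have h0 : pvAstep (PySem.Dict.mk [('(', s1), ('[', s2), ('{', s3), ('<', s4)], res) (i, ']')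
                        = (match PySem.List.pop? s2 (-1) with
                           | some (j, r) => (PySem.Dict.mk [('(', s1), ('[', r), ('{', s3), ('<', s4)], res ++ [(j, i)])
                           | none => (PySem.Dict.mk [('(', s1), ('[', s2), ('{', s3), ('<', s4)], res)) := rfl
                    rw [h0, hp]
                  rw [hstep]
                  refine (ih _ _ _ _ _).trans ?_
                  simp [pvEmit, hp]
                | some jr =>
                  obtain ⟨j, r⟩ := jr
                  have hstep : pvAstep (PySem.Dict.mk [('(', s1), ('[', s2), ('{', s3), ('<', s4)], res) (i, ']')
                      = (PySem.Dict.mk [('(', s1), ('[', r), ('{', s3), ('<', s4)], res ++ [(j, i)]) := by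
                    have h0 : pvAstep (PySem.Dict.mk [('(', s1), ('[', s2), ('{', s3), ('<', s4)], res) (i, ']')
                        = (match PySem.List.pop? s2 (-1) with
                           | some (j, r) => (PySem.Dict.mk [('(', s1), ('[', r), ('{', s3), ('<', s4)], res ++ [(j, i)])
                           | none => (PySem.Dict.mk [('(', s1), ('[', s2), ('{', s3), ('<', s4)], res)) := rfl
                    rw [h0, hp]
                  rw [hstep]
                  refine (ih _ _ _ _ _).trans ?_
                  simp [pvEmit, hp, List.append_assoc]
                  exact List.Perm.append_left _ pvMid1
              · by_cases h7 : ch = '}'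
                · subst h7
                  cases hp : PySem.List.pop? s3 (-1) with
                  | none =>
                    have hstep : pvAstep (PySem.Dict.mk [('(', s1), ('[', s2), ('{', s3), ('<', s4)], res) (i, '}')
                        = (PySem.Dict.mk [('(', s1), ('[', s2), ('{', s3), ('<', s4)], res) := by
                      have h0 : pvAstep (PySem.Dict.mk [('(', s1), ('[', s2), ('{', s3), ('<', s4)], res) (i, '}')
                          = (match PySem.List.pop? s3 (-1) with
                             | some (j, r) => (PySem.Dict.mk [('(', s1), ('[', s2), ('{', r), ('<', s4)], res ++ [(j, i)])
                             | none => (PySem.Dict.mk [('(', s1), ('[', s2), ('{', s3), ('<', s4)], res)) := rfl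
                      rw [h0, hp]
                    rw [hstep]
                    refine (ih _ _ _ _ _).trans ?_
                    simp [pvEmit, hp]
                  | some jr =>
                    obtain ⟨j, r⟩ := jr
                    have hstep : pvAstep (PySem.Dict.mk [('(', s1), ('[', s2), ('{', s3), ('<', s4)], res) (i, '}')
                        = (PySem.Dict.mk [('(', s1), ('[', s2), ('{', r), ('<', s4)], res ++ [(j, i)]) := by
                      have h0 : pvAstep (PySem.Dict.mk [('(', s1), ('[', s2), ('{', s3), ('<', s4)], res) (i, '}')
                          = (match PySem.List.pop? s3 (-1) with
                             | some (j, r) => (PySem.Dict.mk [('(', s1), ('[', s2), ('{', r), ('<', s4)], res ++ [(j, i)])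
                             | none => (PySem.Dict.mk [('(', s1), ('[', s2), ('{', s3), ('<', s4)], res)) := rfl
                      rw [h0, hp]
                    rw [hstep]
                    refine (ih _ _ _ _ _).trans ?_
                    simp [pvEmit, hp, List.append_assoc]
                    exact List.Perm.append_left _ pvMid2
                · by_cases h8 : ch = '>'
                  · subst h8
                    cases hp : PySem.List.pop? s4 (-1) with
                    | none =>
                      have hstep : pvAstep (PySem.Dict.mk [('(', s1), ('[', s2), ('{', s3), ('<', s4)], res) (i, '>')
                          = (PySem.Dict.mk [('(', s1), ('[', s2), ('{', s3), ('<', s4)], res) := by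
                        have h0 : pvAstep (PySem.Dict.mk [('(', s1), ('[', s2), ('{', s3), ('<', s4)], res) (i, '>')
                            = (match PySem.List.pop? s4 (-1) with
                               | some (j, r) => (PySem.Dict.mk [('(', s1), ('[', s2), ('{', s3), ('<', r)], res ++ [(j, i)])
                               | none => (PySem.Dict.mk [('(', s1), ('[', s2), ('{', s3), ('<', s4)], res)) := rfl
                        rw [h0, hp]
                      rw [hstep]
                      refine (ih _ _ _ _ _).trans ?_
                      simp [pvEmit, hp]
                    | some jr =>
                      obtain ⟨j, r⟩ := jr
                      have hstep : pvAstep (PySem.Dict.mk [('(', s1), ('[', s2), ('{', s3), ('<', s4)], res) (i, '>')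
                          = (PySem.Dict.mk [('(', s1), ('[', s2), ('{', s3), ('<', r)], res ++ [(j, i)]) := by
                        have h0 : pvAstep (PySem.Dict.mk [('(', s1), ('[', s2), ('{', s3), ('<', s4)], res) (i, '>')
                            = (match PySem.List.pop? s4 (-1) with
                               | some (j, r) => (PySem.Dict.mk [('(', s1), ('[', s2), ('{', s3), ('<', r)], res ++ [(j, i)])
                               | none => (PySem.Dict.mk [('(', s1), ('[', s2), ('{', s3), ('<', s4)], res)) := rfl
                        rw [h0, hp]
                      rw [hstep]
                      refine (ih _ _ _ _ _).trans ?_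
                      simp [pvEmit, hp, List.append_assoc]
                      exact List.Perm.append_left _ pvMid3
                  · have hopen : pvOPEN_TO_CLOSE.contains ch = false := pvContainsO ch h1 h2 h3 h4
                    have hclose : pvCLOSE_TO_OPEN.contains ch = false := pvContainsC ch h5 h6 h7 h8
                    have hstep : pvAstep (PySem.Dict.mk [('(', s1), ('[', s2), ('{', s3), ('<', s4)], res) (i, ch)
                        = (PySem.Dict.mk [('(', s1), ('[', s2), ('{', s3), ('<', s4)], res) := by
                      simp only [pvAstep]
                      simp [hopen, hclose]
                    rw [hstep]
                    refine (ih _ _ _ _ _).trans ?_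
                    simp [pvEmit, h1, h2, h3, h4, h5, h6, h7, h8]

def pvLexlt (a b : Int × Int) : Prop := a.1 < b.1 ∨ (a.1 = b.1 ∧ a.2 < b.2)

def pvBef (a b : Int × Int) : Bool := decide (a.1 < b.1) || (!decide (b.1 < a.1) && decide (a.2 < b.2))

lemma pvBef_iff (a b : Int × Int) : pvBef a b = true ↔ pvLexlt a b := by
  simp [pvBef, pvLexlt]; omega

lemma pvLexlt_trans {a b c : Int × Int} (h1 : pvLexlt a b) (h2 : pvLexlt b c) : pvLexlt a c := by
  simp [pvLexlt] at *; omega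

lemma pvLexlt_asym {a b : Int × Int} (h1 : pvLexlt a b) : ¬ pvLexlt b a := by
  simp [pvLexlt] at *; omega

lemma pvInsertBy_pairwise (x : Int × Int) (l : List (Int × Int))
    (h : l.Pairwise (fun a b => ¬ pvLexlt b a)) :
    (PySem.List.insertBy pvBef x l).Pairwise (fun a b => ¬ pvLexlt b a) := by
  induction l with
  | nil => simp [PySem.List.insertBy]
  | cons y ys ih =>
    rw [List.pairwise_cons] at h
    by_cases hb : pvBef x y = true
    · have hxy : pvLexlt x y := (pvBef_iff _ _).1 hb
      simp only [PySem.List.insertBy, hb, if_true]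
      refine List.Pairwise.cons ?_ (List.Pairwise.cons h.1 h.2)
      intro z hz
      rcases List.mem_cons.1 hz with rfl | hz'
      · exact pvLexlt_asym hxy
      · intro hzx
        exact h.1 z hz' (pvLexlt_trans hzx hxy)
    · simp only [PySem.List.insertBy, hb]
      refine List.Pairwise.cons ?_ (ih h.2)
      intro z hz
      rcases (PySem.List.mem_insertBy pvBef x z ys).1 hz with rfl | hz'
      · exact fun hxy => hb ((pvBef_iff _ _).2 hxy)
      · exact h.1 z hz'

lemma pvFold_pairwise (xs : List (Int × Int)) :
    ∀ (acc : List (Int × Int)), acc.Pairwise (fun a b => ¬ pvLexlt b a) →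
      (xs.foldl (fun acc x => PySem.List.insertBy pvBef x acc) acc).Pairwise
        (fun a b => ¬ pvLexlt b a) := by
  induction xs with
  | nil => intro acc h; simpa using h
  | cons x xs ih => intro acc h; exact ih _ (pvInsertBy_pairwise x acc h)

lemma pvSorted2_pairwise (xs : List (Int × Int)) :
    (PySem.List.sorted2 xs (fun p => p.1) (fun p => p.2) false).Pairwise
      (fun a b => ¬ pvLexlt b a) := by
  have hdef : PySem.List.sorted2 xs (fun p => (p : Int × Int).1) (fun p => p.2) false
      = xs.foldl (fun acc x => PySem.List.insertBy pvBef x acc) [] := rfl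
  rw [hdef]
  exact pvFold_pairwise xs [] (by simp)

lemma pvSorted2_eq_of_perm (xs ys : List (Int × Int)) (h : xs.Perm ys) :
    PySem.List.sorted2 xs (fun p => p.1) (fun p => p.2) false
      = PySem.List.sorted2 ys (fun p => p.1) (fun p => p.2) false := by
  refine List.eq_of_perm_of_sorted (le := fun a b => ¬ pvLexlt b a) ?_
    (pvSorted2_pairwise xs) (pvSorted2_pairwise ys) ?_
  · rintro ⟨a1, a2⟩ ⟨b1, b2⟩ _ _ hab hba
    simp [pvLexlt] at hab hba
    have : a1 = b1 ∧ a2 = b2 := by omega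
    simp [this.1, this.2]
  · exact (PySem.List.sorted2_perm xs _ _ false).trans
      (h.trans (PySem.List.sorted2_perm ys _ _ false).symm)

-- ===== VERDICT (by name: the statement is the Claim_ definition above) =====
theorem pairs_from_track_spec : Claim_equal_pairs_from_track := by
  intro track _
  unfold Spec_pairs_from_track pairs_from_track pairs_from_track_alt
  apply pvSorted2_eq_of_perm
  have h0 : PySem.Dict.ofList (pvOPEN_TO_CLOSE.keys.map (fun k => (k, ([] : List Int))))
      = PySem.Dict.mk [('(', []), ('[', []), ('{', []), ('<', [])] := rfl
  rw [h0]
  refine (pvA_inv (PySem.List.enumerate track.toList 0) [] [] [] [] []).trans ?_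
  simp [List.foldl_cons, pvB_acc, List.append_assoc]
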